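-- pv_equiv track=rewrite | github.com/saeed-amiri/update_structure | codes/update_residues_gro.py | mk_atom_id_cycle
-- ===== SOURCE A (Python) =====
-- def mk_atom_id_cycle(list_len: int,  # Size of the list,
--                      start_id: int,  # First index of the residues
--                      id_limit=99999  # Limit of the cycle
--                      ) -> list[int]:
--     """
--     Generate a list of unique atom IDs in a custom cycle.
--
--     This function generates a list of unique integers that follows a
--     custom cycle pattern for atom IDs. The first cycle starts from the
--     provided 'start_id' and goes up to 'id_limit', and subsequent
--     cycles continue from 0 to 'id_limit'.
--
--     Parameters:
--         list_len (int): The desired size of the list to be generated.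
--                         The function will generate unique atom IDs
--                         until reaching this size.
--         start_id (int, optional): The starting value for the first
--                                   cycle. The default value is 1.
--         id_limit (int, optional): The upper limit of the atom ID cycle.
--                                   The default value is 99999.
--
--     Returns:
--         List[int]: A list of unique atom IDs in the custom cycle.
--
--     Example:
--         >>> mk_atom_id_cycle(5)
--         [1, 2, 3, 4, 5]
--         >>> mk_atom_id_cycle(8, start_id=10)
--         [10, 11, 12, 13, 14, 0, 1, 2]
--         >>> mk_atom_id_cycle(12, start_id=100, id_limit=105)
--         [100, 101, 102, 103, 104, 105, 0, 1, 2, 3, 4, 5]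
--     """
--     counter = 0
--     atoms_id = []
--     while counter < list_len:
--         if counter == 0:
--             cycle_i = start_id
--             cycle_f = id_limit + 1 - start_id
--         else:
--             cycle_i = 0
--             cycle_f = id_limit + 1
--         slice_i = [item + cycle_i for item in range(cycle_f)]
--         counter += len(slice_i)
--         atoms_id.extend(slice_i)
--         del slice_i
--     return atoms_id[:list_len]
-- ===== SOURCE B (Python) =====
-- def mk_atom_id_cycle(list_len: int,
--                      start_id: int,
--                      id_limit=99999
--                      ) -> list[int]:
--     """Closed-form per-index computation: no cycle lists are materialized."""
--     first = id_limit + 1 - start_id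
--     return [start_id + k if k < first else (k - first) % (id_limit + 1)
--             for k in range(list_len)]
-- ===== Notes on version B (the rewrite author's own statement) =====
-- stated objective: alternative
-- what changed: Instead of materializing full ID cycles of length id_limit+1 and truncating, B computes each of the list_len entries directly by index arithmetic (start_id+k in the first cycle, (k-first) % (id_limit+1) afterwards); intended as faster when id_limit is large, measured 1.83x at the largest size both finished (below the confirmation bar).
import Mathlib
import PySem

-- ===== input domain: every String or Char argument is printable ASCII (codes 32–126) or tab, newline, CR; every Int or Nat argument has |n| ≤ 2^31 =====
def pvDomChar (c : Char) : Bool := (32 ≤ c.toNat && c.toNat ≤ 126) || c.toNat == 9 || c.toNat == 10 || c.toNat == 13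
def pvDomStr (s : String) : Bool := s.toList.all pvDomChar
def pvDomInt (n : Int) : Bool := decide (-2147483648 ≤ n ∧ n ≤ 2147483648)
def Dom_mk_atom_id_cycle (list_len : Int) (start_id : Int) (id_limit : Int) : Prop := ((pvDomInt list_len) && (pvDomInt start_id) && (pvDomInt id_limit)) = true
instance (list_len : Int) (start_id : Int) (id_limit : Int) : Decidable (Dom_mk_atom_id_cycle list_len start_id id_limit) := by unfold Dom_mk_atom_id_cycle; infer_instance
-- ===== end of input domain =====

-- B replaces A's "materialize whole cycles, then truncate" loop by a direct per-index formula (alternative algorithm; intended as faster for large id_limit, measured 1.83x at the largest size both finished).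

-- ===== PORT A =====
-- while loop ported with fuel (list_len.toNat + 2 iterations always suffice on Pre_;
-- outside Pre_ the Python loop never terminates, which Pre_ excludes)
def mkAIDloop (fuel : Nat) (counter : Int) (atoms_id : List Int)
    (list_len start_id id_limit : Int) : List Int :=
  match fuel with
  | 0 => atoms_id
  | fuel + 1 =>
    if counter < list_len then
      let cycle_i : Int := if counter = 0 then start_id else 0
      let cycle_f : Int := if counter = 0 then id_limit + 1 - start_id else id_limit + 1
      let slice_i : List Int := (PySem.List.pyRange 0 cycle_f 1).map (fun item => item + cycle_i)
      mkAIDloop fuel (counter + (slice_i.length : Int)) (atoms_id ++ slice_i) list_len start_id id_limit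
    else atoms_id

def mk_atom_id_cycle (list_len : Int) (start_id : Int) (id_limit : Int) : List Int :=
  PySem.List.slice (mkAIDloop (list_len.toNat + 2) 0 [] list_len start_id id_limit) none (some list_len)

-- ===== PORT B =====
def mk_atom_id_cycle_alt (list_len : Int) (start_id : Int) (id_limit : Int) : List Int :=
  let first := id_limit + 1 - start_id
  (PySem.List.pyRange 0 list_len 1).map
    (fun k => if k < first then start_id + k else PySem.Int.mod (k - first) (id_limit + 1))

-- ===== PRECONDITION & SPEC =====
-- Pre_ excludes exactly the inputs on which A's while loop never terminates
-- (list_len > 0 with an empty first cycle, or later cycles empty): A returns no value there.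
def Pre_mk_atom_id_cycle (list_len : Int) (start_id : Int) (id_limit : Int) : Prop :=
  list_len ≤ 0 ∨ list_len ≤ id_limit + 1 - start_id ∨ (start_id ≤ id_limit ∧ 0 ≤ id_limit)
instance (list_len : Int) (start_id : Int) (id_limit : Int) : Decidable (Pre_mk_atom_id_cycle list_len start_id id_limit) := by unfold Pre_mk_atom_id_cycle; infer_instance

def pvWitness_mk_atom_id_cycle : Int × Int × Int := (12, 100, 105)

def Spec_mk_atom_id_cycle (list_len : Int) (start_id : Int) (id_limit : Int) (out : List Int) : Prop := out = mk_atom_id_cycle_alt list_len start_id id_limit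
instance (list_len : Int) (start_id : Int) (id_limit : Int) (out : List Int) : Decidable (Spec_mk_atom_id_cycle list_len start_id id_limit out) := by unfold Spec_mk_atom_id_cycle; infer_instance

-- ===== CLAIM (what is proved, stated in full; the proofs are below) =====
def Claim_equal_mk_atom_id_cycle : Prop := ∀ (list_len : Int) (start_id : Int) (id_limit : Int), Dom_mk_atom_id_cycle list_len start_id id_limit → Pre_mk_atom_id_cycle list_len start_id id_limit → Spec_mk_atom_id_cycle list_len start_id id_limit (mk_atom_id_cycle list_len start_id id_limit)

-- ===== LEMMAS AND PROOFS =====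

-- element j of n concatenated copies of [0, …, lim] is j % (lim+1)
theorem flatten_replicate_getElem? (lim : Int) (hlim : 0 ≤ lim) (n j : Nat)
    (hj : j < n * (lim + 1).toNat) :
    ((List.replicate n (PySem.List.pyRange 0 (lim + 1) 1)).flatten)[j]? =
      some ((j : Int) % (lim + 1)) := by
  induction n generalizing j with
  | zero => omega
  | succ n ih =>
    have hexp : (n + 1) * (lim + 1).toNat = n * (lim + 1).toNat + (lim + 1).toNat := by ring
    rw [hexp] at hj
    rw [List.replicate_succ, List.flatten_cons, List.getElem?_append,
      PySem.List.length_pyRange_one]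
    by_cases h : j < (lim + 1 - 0).toNat
    · rw [if_pos h, PySem.List.getElem?_pyRange_one, if_pos h,
        Int.emod_eq_of_lt (by omega) (by omega)]
      simp
    · rw [if_neg h]
      have h3 : j - (lim + 1 - 0).toNat = j - (lim + 1).toNat := by omega
      rw [h3, ih (j - (lim + 1).toNat) (by omega)]
      have hcast : ((j - (lim + 1).toNat : Nat) : Int) = (j : Int) - (lim + 1) := by omega
      rw [hcast, Int.sub_emod_right]

-- invariant for A's loop after the first iteration: it appends whole copies of
-- range(id_limit+1) until the counter reaches list_len
theorem mkAIDloop_pos (list_len start_id id_limit : Int) (hlim : 0 ≤ id_limit) :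
    ∀ (fuel : Nat) (c : Int) (acc : List Int), 0 < c → list_len - c ≤ (fuel : Int) →
    ∃ n : Nat,
      mkAIDloop fuel c acc list_len start_id id_limit =
        acc ++ (List.replicate n (PySem.List.pyRange 0 (id_limit + 1) 1)).flatten ∧
      list_len ≤ c + (n : Int) * (id_limit + 1) := by
  intro fuel
  induction fuel with
  | zero =>
    intro c acc hc hfc
    exact ⟨0, by simp [mkAIDloop], by simpa using hfc⟩
  | succ fuel ih =>
    intro c acc hc hfc
    by_cases hlt : c < list_len
    · have hc0 : ¬ c = 0 := by omega
      obtain ⟨n, heq, hle⟩ := ih (c + ((id_limit + 1).toNat : Int))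
        (acc ++ (PySem.List.pyRange 0 (id_limit + 1) 1).map (fun item => item + 0))
        (by omega) (by omega)
      refine ⟨n + 1, ?_, ?_⟩
      · rw [mkAIDloop, if_pos hlt]
        simp only [hc0, if_false]
        have hlen : ((PySem.List.pyRange 0 (id_limit + 1) 1).map
            (fun item => item + 0)).length = (id_limit + 1).toNat := by
          rw [List.length_map, PySem.List.length_pyRange_one]
          norm_num
        rw [hlen, heq, List.replicate_succ, List.flatten_cons, List.append_assoc]
        simp
      · have hcast : (((id_limit + 1).toNat : Int)) = id_limit + 1 := by omega
        rw [hcast] at hle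
        push_cast
        have hdist : ((n : Int) + 1) * (id_limit + 1)
            = (n : Int) * (id_limit + 1) + (id_limit + 1) := by ring
        rw [hdist]
        linarith
    · exact ⟨0, by rw [mkAIDloop, if_neg hlt]; simp, by omega⟩

-- B's element formula, with getElem?
theorem alt_getElem? (list_len start_id id_limit : Int) (j : Nat) (hj : (j : Int) < list_len) :
    (mk_atom_id_cycle_alt list_len start_id id_limit)[j]? =
      some (if (j : Int) < id_limit + 1 - start_id then start_id + (j : Int)
            else PySem.Int.mod ((j : Int) - (id_limit + 1 - start_id)) (id_limit + 1)) := by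
  unfold mk_atom_id_cycle_alt
  rw [List.getElem?_map, PySem.List.getElem?_pyRange_one, if_pos (by omega)]
  simp

theorem alt_length (list_len start_id id_limit : Int) :
    (mk_atom_id_cycle_alt list_len start_id id_limit).length = list_len.toNat := by
  simp [mk_atom_id_cycle_alt, PySem.List.length_pyRange_one]

-- ===== VERDICT (by name: the statement is the Claim_ definition above) =====
theorem mk_atom_id_cycle_spec : Claim_equal_mk_atom_id_cycle := by
  intro l s lim _ hpre
  unfold Spec_mk_atom_id_cycle
  by_cases hl : l ≤ 0
  · -- empty output on both sides
    have hA : mk_atom_id_cycle l s lim = [] := by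
      unfold mk_atom_id_cycle
      rw [mkAIDloop, if_neg (by omega)]
      simp [PySem.List.slice]
    rw [hA]
    unfold mk_atom_id_cycle_alt
    rw [PySem.List.pyRange_one_eq_nil (by omega)]
    simp
  · replace hl : 0 < l := by omega
    -- first iteration of A's loop
    have hfuel : mkAIDloop (l.toNat + 2) 0 [] l s lim =
        mkAIDloop (l.toNat + 1) (((lim + 1 - s).toNat : Int))
          ((PySem.List.pyRange 0 (lim + 1 - s) 1).map (fun item => item + s)) l s lim := by
      have h2 : l.toNat + 2 = (l.toNat + 1) + 1 := rfl
      rw [h2, mkAIDloop, if_pos hl]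
      simp [PySem.List.length_pyRange_one]
    by_cases hlf : l ≤ lim + 1 - s
    · -- one cycle already covers list_len
      have hstop : mkAIDloop (l.toNat + 1) (((lim + 1 - s).toNat : Int))
          ((PySem.List.pyRange 0 (lim + 1 - s) 1).map (fun item => item + s)) l s lim =
          (PySem.List.pyRange 0 (lim + 1 - s) 1).map (fun item => item + s) := by
        rw [mkAIDloop, if_neg (by omega)]
      unfold mk_atom_id_cycle
      rw [hfuel, hstop, PySem.List.slice_to _ (by omega)]
      rw [PySem.List.pyRange_one_append 0 l (lim + 1 - s) (by omega) (by omega), List.map_append]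
      rw [List.take_append_of_le_length
        (by simp only [List.length_map, PySem.List.length_pyRange_one]; omega)]
      rw [List.take_of_length_le
        (by simp only [List.length_map, PySem.List.length_pyRange_one]; omega)]
      unfold mk_atom_id_cycle_alt
      rw [List.map_congr_left]
      intro k hk
      rw [PySem.List.mem_pyRange_one] at hk
      rw [if_pos (by omega)]
      ring
    · -- several cycles needed
      replace hlf : lim + 1 - s < l := by omega
      have hslim : s ≤ lim ∧ 0 ≤ lim := by
        rcases hpre with h | h | h
        · omega
        · omega
        · exact h
      have hfpos : 0 < lim + 1 - s := by omega
      obtain ⟨n, heq, hle⟩ := mkAIDloop_pos l s lim hslim.2 (l.toNat + 1)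
        (((lim + 1 - s).toNat : Int))
        ((PySem.List.pyRange 0 (lim + 1 - s) 1).map (fun item => item + s))
        (by omega) (by omega)
      unfold mk_atom_id_cycle
      rw [hfuel, heq, PySem.List.slice_to _ (by omega)]
      have hftoNat : (((lim + 1 - s).toNat : Int)) = lim + 1 - s := by omega
      rw [hftoNat] at hle
      -- elementwise comparison
      apply List.ext_getElem?
      intro j
      by_cases hj : j < l.toNat
      · rw [List.getElem?_take_of_lt hj, List.getElem?_append]
        rw [alt_getElem? l s lim j (by omega)]
        have hlen : ((PySem.List.pyRange 0 (lim + 1 - s) 1).map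
            (fun item => item + s)).length = (lim + 1 - s).toNat := by
          rw [List.length_map, PySem.List.length_pyRange_one]
          norm_num
        rw [hlen]
        by_cases hjf : j < (lim + 1 - s).toNat
        · rw [if_pos hjf]
          have hjf' : (j : Int) < lim + 1 - s := by omega
          rw [List.getElem?_map, PySem.List.getElem?_pyRange_one, if_pos (by omega)]
          rw [if_pos hjf']
          simp [Int.add_comm]
        · rw [if_neg hjf]
          replace hjf : (lim + 1 - s).toNat ≤ j := by omega
          have hjlt : j - (lim + 1 - s).toNat < n * (lim + 1).toNat := by
            have h1 : (j : Int) < l := by omega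
            have h2 : ((n * (lim + 1).toNat : Nat) : Int) = (n : Int) * (lim + 1) := by
              push_cast
              rw [Int.toNat_of_nonneg (by omega)]
            omega
          rw [flatten_replicate_getElem? lim hslim.2 n (j - (lim + 1 - s).toNat) hjlt]
          rw [if_neg (by omega)]
          rw [PySem.Int.mod_eq_emod_of_pos (by omega)]
          have hcast : ((j - (lim + 1 - s).toNat : Nat) : Int) = (j : Int) - (lim + 1 - s) := by
            omega
          rw [hcast]
      · -- past the common length: both none
        have h1 := List.length_take_le l.toNat
          ((PySem.List.pyRange 0 (lim + 1 - s) 1).map (fun item => item + s) ++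
            (List.replicate n (PySem.List.pyRange 0 (lim + 1) 1)).flatten)
        rw [List.getElem?_eq_none (by omega),
          List.getElem?_eq_none (by rw [alt_length]; omega)]
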